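-- pv_equiv track=rewrite | github.com/osbm/programming-languages | src/python/main.py | scan_upto
-- ===== SOURCE A (Python) =====
-- def collatz_len_and_peak(x: int) -> tuple[int, int]:
--
--     steps = 0
--     peak = x
--     n = x
--     while n != 1:
--         if n & 1:  # odd
--             n = 3 * n + 1
--         else:      # even
--             n >>= 1
--         if n > peak:
--             peak = n
--         steps += 1
--     return steps, peak
--
-- def scan_upto(N: int):
--     best_n = 1
--     best_steps = 0
--     best_peak = 1
--     xor_steps = 0
--
--     for n in range(1, N + 1):
--         steps, peak = collatz_len_and_peak(n)
--         xor_steps ^= steps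
--         if steps > best_steps:
--             best_steps = steps
--             best_n = n
--             best_peak = peak
--
--     return best_n, best_steps, best_peak, xor_steps
-- ===== SOURCE B (Python) =====
-- def _steps(n):
--     c = 0
--     while n != 1:
--         n = 3 * n + 1 if n & 1 else n >> 1
--         c += 1
--     return c
--
-- def _peak(n):
--     p = n
--     while n != 1:
--         n = 3 * n + 1 if n & 1 else n >> 1
--         if n > p:
--             p = n
--     return p
--
-- def scan_upto(N: int):
--     steps = [_steps(n) for n in range(1, N + 1)]
--     if not steps:
--         return 1, 0, 1, 0
--     xor_steps = 0
--     for s in steps: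
--         xor_steps ^= s
--     best_steps = max(steps)
--     best_n = 1 + steps.index(best_steps)
--     return best_n, best_steps, _peak(best_n), xor_steps
-- ===== Notes on version B (the rewrite author's own statement) =====
-- stated objective: alternative
-- what changed: B replaces A's single interleaved pass (length+peak computed together for every n, running-best comparison per n) by staged passes: it first materializes the list of Collatz lengths only, folds XOR over that list, selects the winner with max()+index() (first argmax), and walks a trajectory for the peak exactly once, for the winning start.
import Mathlib
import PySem

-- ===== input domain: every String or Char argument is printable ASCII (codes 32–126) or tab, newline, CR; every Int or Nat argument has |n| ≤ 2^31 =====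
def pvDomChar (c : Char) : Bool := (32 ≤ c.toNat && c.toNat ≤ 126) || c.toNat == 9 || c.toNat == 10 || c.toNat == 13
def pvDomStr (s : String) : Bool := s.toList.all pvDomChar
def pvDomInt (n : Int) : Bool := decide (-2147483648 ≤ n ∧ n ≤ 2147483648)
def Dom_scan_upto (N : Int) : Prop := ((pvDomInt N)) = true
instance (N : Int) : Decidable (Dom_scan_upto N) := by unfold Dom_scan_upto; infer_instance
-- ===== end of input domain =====

-- B stages the work instead of A's single interleaved pass: it materializes the list of
-- Collatz lengths only, folds XOR over it, picks the winner by max()+index() (first argmax),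
-- and walks one extra trajectory for the winner's peak; objective: alternative (same cost).

-- ===== PORT A =====
-- collatz_len_and_peak's while-loop; fuel bounds the iteration count (Python's loop is
-- believed total but that is unprovable, so the port carries fuel).
def collatzLoopA : Nat → Int → Int → Int → Int × Int
  | 0, steps, peak, _n => (steps, peak)
  | Nat.succ f, steps, peak, n =>
    if n = 1 then (steps, peak)
    else
      let n' : Int := if PySem.Int.band n 1 ≠ 0 then 3 * n + 1 else n >>> (1 : Nat)
      let peak' : Int := if n' > peak then n' else peak
      collatzLoopA f (steps + 1) peak' n'

def stepA (s : Int × Int × Int × Int) (n : Int) : Int × Int × Int × Int :=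
  let r := collatzLoopA 100000 0 n n
  let xr := PySem.Int.bxor s.2.2.2 r.1
  if r.1 > s.2.1 then (n, r.1, r.2, xr) else (s.1, s.2.1, s.2.2.1, xr)

def scan_upto (N : Int) : Int × Int × Int × Int :=
  (PySem.List.pyRange 1 (N + 1) 1).foldl stepA (1, 0, 1, 0)

-- ===== PORT B =====
-- _steps's while-loop: the trajectory length alone (same fuel discipline: one unit per
-- Collatz step, exactly as A's loop consumes it).
def stepsB : Nat → Int → Int → Int
  | 0, c, _n => c
  | Nat.succ f, c, n =>
    if n = 1 then c
    else stepsB f (c + 1) (if PySem.Int.band n 1 ≠ 0 then 3 * n + 1 else n >>> (1 : Nat))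

-- _peak's while-loop: the trajectory maximum alone.
def peakB : Nat → Int → Int → Int
  | 0, p, _n => p
  | Nat.succ f, p, n =>
    if n = 1 then p
    else
      let n' : Int := if PySem.Int.band n 1 ≠ 0 then 3 * n + 1 else n >>> (1 : Nat)
      peakB f (if n' > p then n' else p) n'

def scan_upto_alt (N : Int) : Int × Int × Int × Int :=
  let steps := (PySem.List.pyRange 1 (N + 1) 1).map (fun n => stepsB 100000 0 n)
  if steps.isEmpty then (1, 0, 1, 0)
  else
    let xor_steps := steps.foldl PySem.Int.bxor 0
    let best_steps := (PySem.List.max? steps (fun y => y)).getD 0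
    let best_n : Int := 1 + (((PySem.List.index? steps best_steps).getD 0 : Nat) : Int)
    (best_n, best_steps, peakB 100000 best_n best_n, xor_steps)

-- ===== PRECONDITION & SPEC =====
def Spec_scan_upto (N : Int) (out : Int × Int × Int × Int) : Prop := out = scan_upto_alt N
instance (N : Int) (out : Int × Int × Int × Int) : Decidable (Spec_scan_upto N out) := by unfold Spec_scan_upto; infer_instance

-- ===== CLAIM (what is proved, stated in full; the proofs are below) =====
def Claim_equal_scan_upto : Prop := ∀ (N : Int), Dom_scan_upto N → Spec_scan_upto N (scan_upto N)

-- ===== LEMMAS AND PROOFS =====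

-- the steps counter is an accumulator
theorem stepsB_acc (f : Nat) (c : Int) (n : Int) :
    stepsB f c n = c + stepsB f 0 n := by
  induction f generalizing c n with
  | zero => simp [stepsB]
  | succ f ih =>
    simp only [stepsB]
    split
    · simp
    · rw [ih (c + 1), ih (0 + 1)]; ring

-- A's combined loop computes exactly B's two separate loops, fuel step for fuel step
theorem collatzLoopA_eq (f : Nat) (st pk n : Int) :
    collatzLoopA f st pk n = (st + stepsB f 0 n, peakB f pk n) := by
  induction f generalizing st pk n with
  | zero => simp [collatzLoopA, stepsB, peakB]
  | succ f ih =>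
    simp only [collatzLoopA, stepsB, peakB]
    split
    · simp
    · rw [ih, stepsB_acc f (0 + 1)]
      exact Prod.ext (by ring) rfl

theorem stepsB_one (f : Nat) : stepsB f 0 1 = 0 := by
  cases f <;> simp [stepsB]

theorem peakB_one (f : Nat) (p : Int) : peakB f p 1 = p := by
  cases f <;> simp [peakB]

-- the invariant of A's running-best fold over 1..k, phrased through B's building blocks:
-- the best steps is the running max of the steps list, the best n is 1 + its first index,
-- the best peak is B's peak walk at that n, and the xor is B's fold over the list
theorem foldA_inv (k : Nat) (hk : 1 ≤ k) :
    ∃ j : Nat,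
      (PySem.List.pyRange 1 ((k : Int) + 1) 1).foldl stepA (1, 0, 1, 0) =
        (1 + (j : Int),
         ((PySem.List.pyRange 1 ((k : Int) + 1) 1).map (fun n => stepsB 100000 0 n)).foldl max 0,
         peakB 100000 (1 + (j : Int)) (1 + (j : Int)),
         ((PySem.List.pyRange 1 ((k : Int) + 1) 1).map (fun n => stepsB 100000 0 n)).foldl PySem.Int.bxor 0) ∧
      PySem.List.index? ((PySem.List.pyRange 1 ((k : Int) + 1) 1).map (fun n => stepsB 100000 0 n))
          (((PySem.List.pyRange 1 ((k : Int) + 1) 1).map (fun n => stepsB 100000 0 n)).foldl max 0)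
        = some j := by
  induction k with
  | zero => omega
  | succ k ih =>
    by_cases hk1 : k = 0
    · subst hk1
      have h12 : PySem.List.pyRange 1 ((((0 : Nat) + 1 : Nat) : Int) + 1) 1 = [1] := by
        norm_num
        decide
      refine ⟨0, ?_, ?_⟩
      · rw [h12]
        simp only [List.foldl_cons, List.foldl_nil, List.map_cons, List.map_nil, stepA,
          collatzLoopA_eq, stepsB_one, peakB_one]
        norm_num
        exact (peakB_one _ _).symm
      · rw [h12]
        simp only [List.map_cons, List.map_nil, List.foldl_cons, List.foldl_nil, stepsB_one]
        norm_num [PySem.List.index?_cons_self]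
    · obtain ⟨j, hfold, hidx⟩ := ih (by omega)
      have hsplit : PySem.List.pyRange 1 ((↑(k + 1) : Int) + 1) 1 =
          PySem.List.pyRange 1 ((k : Int) + 1) 1 ++ [(k : Int) + 1] := by
        push_cast
        rw [show ((k : Int) + 1 + 1) = (((k : Int) + 1) + 1) by ring]
        exact PySem.List.pyRange_one_succ_right (by omega)
      set L := (PySem.List.pyRange 1 ((k : Int) + 1) 1).map (fun n => stepsB 100000 0 n) with hL
      set m := L.foldl max 0 with hm
      set s := stepsB 100000 0 ((k : Int) + 1) with hs
      have hmapsplit :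
          (PySem.List.pyRange 1 ((↑(k + 1) : Int) + 1) 1).map (fun n => stepsB 100000 0 n)
            = L ++ [s] := by rw [hsplit, List.map_append]; rfl
      have hmem : m ∈ L := by
        have := PySem.List.index?_isSome_iff (xs := L) (v := m)
        rw [hidx] at this
        simpa using this.mp rfl
      have hfold' : (L ++ [s]).foldl max 0 = max m s := by
        rw [List.foldl_append]; rfl
      rw [hmapsplit, hsplit, List.foldl_append, hfold, hfold']
      simp only [List.foldl_cons, List.foldl_nil, stepA, collatzLoopA_eq, zero_add]
      by_cases hgt : s > m
      · refine ⟨L.length, ?_, ?_⟩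
        · rw [if_pos (by simpa using hgt)]
          have hlen : (L.length : Int) = (k : Int) := by
            rw [hL]; simp [PySem.List.length_pyRange_one]
          have hmax : max m s = s := by omega
          rw [hmax, List.foldl_append, hlen,
            show (1 : Int) + (k : Int) = (k : Int) + 1 from by ring]
          simp only [List.foldl_cons, List.foldl_nil]
          rfl
        · have hnotmem : s ∉ L := by
            intro hmemL
            have hle := (PySem.List.le_foldl_max L 0).2 s hmemL
            omega
          have hmax : max m s = s := by omega
          rw [hmax]
          exact PySem.List.index?_append_singleton_self _ _ hnotmem
      · refine ⟨j, ?_, ?_⟩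
        · rw [if_neg (by simpa using hgt)]
          have hmax : max m s = m := by omega
          rw [hmax, List.foldl_append]
          simp only [List.foldl_cons, List.foldl_nil]
          rfl
        · have hmax : max m s = m := by omega
          rw [hmax, PySem.List.index?_append_of_mem _ hmem, hidx]

-- Python's max(steps) over the nonempty range 1..k is the running max with seed 0
-- (the first entry is steps(1) = 0)
theorem maxD_eq_foldl (k : Nat) (hk : 1 ≤ k) :
    (PySem.List.max? ((PySem.List.pyRange 1 ((k : Int) + 1) 1).map (fun n => stepsB 100000 0 n)) (fun y => y)).getD 0
      = ((PySem.List.pyRange 1 ((k : Int) + 1) 1).map (fun n => stepsB 100000 0 n)).foldl max 0 := by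
  have hcons : PySem.List.pyRange 1 ((k : Int) + 1) 1 = 1 :: PySem.List.pyRange 2 ((k : Int) + 1) 1 :=
    PySem.List.pyRange_one_cons (by omega)
  rw [hcons]
  simp only [List.map_cons, stepsB_one, List.foldl_cons]
  rw [PySem.List.max?_id_cons]
  simp

theorem pyRange_nonempty (k : Nat) (hk : 1 ≤ k) :
    ((PySem.List.pyRange 1 ((k : Int) + 1) 1).map (fun n => stepsB 100000 0 n)).isEmpty = false := by
  rw [PySem.List.pyRange_one_cons (a := 1) (b := (k : Int) + 1) (by omega)]
  rfl

-- ===== VERDICT (by name: the statement is the Claim_ definition above) =====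
theorem scan_upto_spec : Claim_equal_scan_upto := by
  intro N _
  unfold Spec_scan_upto scan_upto scan_upto_alt
  by_cases h : 1 ≤ N
  · have hNk : N = ((N.toNat : Nat) : Int) := by omega
    have hk : 1 ≤ N.toNat := by omega
    rw [hNk]
    obtain ⟨j, hfold, hidx⟩ := foldA_inv N.toNat hk
    rw [hfold]
    simp only [pyRange_nonempty N.toNat hk, Bool.false_eq_true, if_false]
    rw [maxD_eq_foldl N.toNat hk, hidx]
    rfl
  · have hempty : PySem.List.pyRange 1 (N + 1) 1 = [] :=
      PySem.List.pyRange_one_eq_nil (by omega)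
    rw [hempty]
    rfl
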